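-- pv_equiv track=rewrite | github.com/sy-yunyi/malicious_detection | Dutils.py | groupBySqu
-- ===== SOURCE A (Python) =====
-- import itertools
--
-- def groupBySqu(method_list,end_path_list,arg_name_list,arg_val_list,lable=0,window=5,step=5):
--     """
--     method_list,end_path_list,arg_name_list,arg_val_list: 数据，格式为[[1,2],[3,4],[5,6],[7,8]]
--     划分目的为：[[1,2,3,4],[5,6,7,8]]
--     window：每个划分的大小
--     step：步长
--     lable：数据标签
--     返回值：
--         data:划分后的数据，格式为[[1,2,3,4],[5,6,7,8]]
--         labels: 标签列表，格式为[1,1]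
--         end_group : 每个序列中末端路径列表
--         arg_name_group ：每个序列中参数名称列表
--         arg_val_group ：每个列表中参数值列表
--     """
--     i=0
--     data_group = []
--     end_group = []
--     labels = []
--     arg_name_group = []
--     arg_val_group = []
--     while((i+window) < len(method_list)):
--         gd = []
--         method_g = method_list[i:i+window]
--         end_g = end_path_list[i:i+window]
--         arg_name_g = arg_name_list[i:i+window]
--         arg_val_g = arg_val_list[i:i+window]
--         i = i + step
--         for j in range(window):
--             args = []
--             for n,v in zip(arg_name_g[j],arg_val_g[j]):
--                 args.append(n)
--                 args.append(v)
--             gd.extend(method_g[j]+end_g[j]+args)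
--         data_group.append(gd)
--         labels.append(lable)
--         end_group.append(list(itertools.chain(*end_g)))
--         arg_name_group.append(list(itertools.chain(*arg_name_g)))
--         arg_val_group.append(list(itertools.chain(*arg_val_g)))
--     return data_group,labels,end_group,arg_name_group,arg_val_group
-- ===== SOURCE B (Python) =====
-- import itertools
--
-- def groupBySqu(method_list, end_path_list, arg_name_list, arg_val_list, lable=0, window=5, step=5):
--     # Precompute one flat feature row per position: method + end_path + interleaved (name, value) pairs.
--     feat = [m + e + [x for pair in zip(an, av) for x in pair]
--             for m, e, an, av in zip(method_list, end_path_list, arg_name_list, arg_val_list)]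
--     n = len(method_list)
--     starts = range(0, n - window, step) if step > 0 else []
--     data_group, labels = [], []
--     end_group, arg_name_group, arg_val_group = [], [], []
--     for i in starts:
--         data_group.append(list(itertools.chain.from_iterable(feat[i:i + window])))
--         labels.append(lable)
--         end_group.append(list(itertools.chain.from_iterable(end_path_list[i:i + window])))
--         arg_name_group.append(list(itertools.chain.from_iterable(arg_name_list[i:i + window])))
--         arg_val_group.append(list(itertools.chain.from_iterable(arg_val_list[i:i + window])))
--     return data_group, labels, end_group, arg_name_group, arg_val_group
-- ===== Notes on version B (the rewrite author's own statement) =====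
-- stated objective: alternative
-- what changed: B precomputes once, per position, a flat feature row (method + end_path + interleaved name/value pairs) and then builds each window's data entry by chaining the precomputed slice feat[i:i+window], with the window starts taken from a range object, instead of A's per-window inner j-loop that re-interleaves the argument pairs inside every window.
import Mathlib
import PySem

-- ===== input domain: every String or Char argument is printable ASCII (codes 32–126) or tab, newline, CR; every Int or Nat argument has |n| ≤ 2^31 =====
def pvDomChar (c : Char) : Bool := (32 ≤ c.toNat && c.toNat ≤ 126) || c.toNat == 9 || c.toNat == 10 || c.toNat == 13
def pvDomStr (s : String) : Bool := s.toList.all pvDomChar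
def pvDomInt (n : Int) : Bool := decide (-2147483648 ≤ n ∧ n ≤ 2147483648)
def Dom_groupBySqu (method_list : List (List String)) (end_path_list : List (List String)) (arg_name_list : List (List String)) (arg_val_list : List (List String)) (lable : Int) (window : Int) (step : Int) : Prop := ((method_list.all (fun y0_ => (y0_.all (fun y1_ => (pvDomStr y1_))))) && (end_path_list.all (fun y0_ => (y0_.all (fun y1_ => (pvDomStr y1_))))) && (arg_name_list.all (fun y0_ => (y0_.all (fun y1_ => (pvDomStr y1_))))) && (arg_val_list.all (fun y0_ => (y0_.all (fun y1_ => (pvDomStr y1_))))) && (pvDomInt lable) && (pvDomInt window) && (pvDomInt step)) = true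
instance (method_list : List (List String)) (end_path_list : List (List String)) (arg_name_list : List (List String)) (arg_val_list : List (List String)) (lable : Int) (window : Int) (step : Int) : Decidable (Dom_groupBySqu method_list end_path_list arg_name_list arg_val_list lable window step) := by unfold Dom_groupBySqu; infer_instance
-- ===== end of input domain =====

-- B replaces A's per-window inner loop that re-interleaves argument pairs by a single
-- precomputed flat feature row per position, consumed by slicing; an alternative decomposition.
-- Pre_ restricts to the natural domain: nonnegative window, positive step whenever the loop runs,
-- and the three parallel lists long enough for every index A's inner loop touches.

-- ===== PORT A =====
def pvInterleave (ns vs : List String) : List String :=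
  (ns.zip vs).foldl (fun args p => args ++ [p.1, p.2]) []

def pvGd (method_g end_g arg_name_g arg_val_g : List (List String)) (window : Int) : List String :=
  (PySem.List.pyRange 0 window 1).foldl (fun gd j =>
    gd ++ (PySem.List.pyGetD method_g j [] ++ PySem.List.pyGetD end_g j [] ++
      pvInterleave (PySem.List.pyGetD arg_name_g j []) (PySem.List.pyGetD arg_val_g j []))) []

def pvALoop (method_list end_path_list arg_name_list arg_val_list : List (List String))
    (lable window step : Int) :
    Nat → Int →
    List (List String) → List Int → List (List String) → List (List String) → List (List String) →
    List (List String) × List Int × List (List String) × List (List String) × List (List String)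
  | 0, _, data, labs, eg, ang, avg => (data, labs, eg, ang, avg)
  | fuel+1, i, data, labs, eg, ang, avg =>
    if i + window < (method_list.length : Int) then
      let method_g := PySem.List.slice method_list (some i) (some (i+window))
      let end_g := PySem.List.slice end_path_list (some i) (some (i+window))
      let arg_name_g := PySem.List.slice arg_name_list (some i) (some (i+window))
      let arg_val_g := PySem.List.slice arg_val_list (some i) (some (i+window))
      pvALoop method_list end_path_list arg_name_list arg_val_list lable window step fuel (i+step)
        (data ++ [pvGd method_g end_g arg_name_g arg_val_g window])
        (labs ++ [lable]) (eg ++ [end_g.flatten]) (ang ++ [arg_name_g.flatten])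
        (avg ++ [arg_val_g.flatten])
    else (data, labs, eg, ang, avg)

def groupBySqu (method_list : List (List String)) (end_path_list : List (List String)) (arg_name_list : List (List String)) (arg_val_list : List (List String)) (lable : Int) (window : Int) (step : Int) : List (List String) × List Int × List (List String) × List (List String) × List (List String) :=
  pvALoop method_list end_path_list arg_name_list arg_val_list lable window step
    (method_list.length + 1) 0 [] [] [] [] []

-- ===== PORT B =====
def pvFeatRow (r : List String × (List String × (List String × List String))) : List String :=
  r.1 ++ r.2.1 ++ (r.2.2.1.zip r.2.2.2).flatMap (fun p => [p.1, p.2])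

def pvBStep (end_path_list arg_name_list arg_val_list feat : List (List String))
    (lable window : Int)
    (acc : List (List String) × List Int × List (List String) × List (List String) × List (List String))
    (i : Int) :
    List (List String) × List Int × List (List String) × List (List String) × List (List String) :=
  (acc.1 ++ [(PySem.List.slice feat (some i) (some (i+window))).flatten],
   acc.2.1 ++ [lable],
   acc.2.2.1 ++ [(PySem.List.slice end_path_list (some i) (some (i+window))).flatten],
   acc.2.2.2.1 ++ [(PySem.List.slice arg_name_list (some i) (some (i+window))).flatten],
   acc.2.2.2.2 ++ [(PySem.List.slice arg_val_list (some i) (some (i+window))).flatten])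

def groupBySqu_alt (method_list : List (List String)) (end_path_list : List (List String)) (arg_name_list : List (List String)) (arg_val_list : List (List String)) (lable : Int) (window : Int) (step : Int) : List (List String) × List Int × List (List String) × List (List String) × List (List String) :=
  let feat := (method_list.zip (end_path_list.zip (arg_name_list.zip arg_val_list))).map pvFeatRow
  let n : Int := method_list.length
  let starts := if 0 < step then PySem.List.pyRange 0 (n - window) step else []
  starts.foldl (pvBStep end_path_list arg_name_list arg_val_list feat lable window)
    ([], [], [], [], [])

-- ===== PRECONDITION & SPEC =====
-- Pre_ restricts to the natural domain and excludes crashes/divergence: window must be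
-- nonnegative (on negative window A's slices wrap around, an accident of Python slicing);
-- whenever the loop runs step must be positive (A diverges on step <= 0); and when the inner
-- loop indexes (1 <= window) the three parallel lists must reach length n-1, a slightly
-- conservative bound covering every index A touches (A raises IndexError on shorter lists).
def Pre_groupBySqu (method_list : List (List String)) (end_path_list : List (List String)) (arg_name_list : List (List String)) (arg_val_list : List (List String)) (lable : Int) (window : Int) (step : Int) : Prop :=
  0 ≤ window ∧
  (window < (method_list.length : Int) → 1 ≤ step) ∧
  (1 ≤ window → window < (method_list.length : Int) →
    ((method_list.length : Int) - 1 ≤ (end_path_list.length : Int) ∧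
     (method_list.length : Int) - 1 ≤ (arg_name_list.length : Int) ∧
     (method_list.length : Int) - 1 ≤ (arg_val_list.length : Int)))
instance (method_list : List (List String)) (end_path_list : List (List String)) (arg_name_list : List (List String)) (arg_val_list : List (List String)) (lable : Int) (window : Int) (step : Int) : Decidable (Pre_groupBySqu method_list end_path_list arg_name_list arg_val_list lable window step) := by unfold Pre_groupBySqu; infer_instance

def pvWitness_groupBySqu : List (List String) × List (List String) × List (List String) × List (List String) × Int × Int × Int :=
  ([["a"], ["b"], ["c"]], [["p"], ["q"], ["r"]], [["n"], ["n"], ["n"]], [["v"], ["v"], ["v"]], 0, 1, 1)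

def Spec_groupBySqu (method_list : List (List String)) (end_path_list : List (List String)) (arg_name_list : List (List String)) (arg_val_list : List (List String)) (lable : Int) (window : Int) (step : Int) (out : List (List String) × List Int × List (List String) × List (List String) × List (List String)) : Prop := out = groupBySqu_alt method_list end_path_list arg_name_list arg_val_list lable window step
instance (method_list : List (List String)) (end_path_list : List (List String)) (arg_name_list : List (List String)) (arg_val_list : List (List String)) (lable : Int) (window : Int) (step : Int) (out : List (List String) × List Int × List (List String) × List (List String) × List (List String)) : Decidable (Spec_groupBySqu method_list end_path_list arg_name_list arg_val_list lable window step out) := by unfold Spec_groupBySqu; infer_instance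

-- ===== CLAIM (what is proved, stated in full; the proofs are below) =====
def Claim_equal_groupBySqu : Prop := ∀ (method_list : List (List String)) (end_path_list : List (List String)) (arg_name_list : List (List String)) (arg_val_list : List (List String)) (lable : Int) (window : Int) (step : Int), Dom_groupBySqu method_list end_path_list arg_name_list arg_val_list lable window step → Pre_groupBySqu method_list end_path_list arg_name_list arg_val_list lable window step → Spec_groupBySqu method_list end_path_list arg_name_list arg_val_list lable window step (groupBySqu method_list end_path_list arg_name_list arg_val_list lable window step)

-- ===== LEMMAS AND PROOFS =====
theorem pvWitness_ok :
    Dom_groupBySqu pvWitness_groupBySqu.1 pvWitness_groupBySqu.2.1 pvWitness_groupBySqu.2.2.1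
      pvWitness_groupBySqu.2.2.2.1 pvWitness_groupBySqu.2.2.2.2.1 pvWitness_groupBySqu.2.2.2.2.2.1
      pvWitness_groupBySqu.2.2.2.2.2.2 ∧
    Pre_groupBySqu pvWitness_groupBySqu.1 pvWitness_groupBySqu.2.1 pvWitness_groupBySqu.2.2.1
      pvWitness_groupBySqu.2.2.2.1 pvWitness_groupBySqu.2.2.2.2.1 pvWitness_groupBySqu.2.2.2.2.2.1
      pvWitness_groupBySqu.2.2.2.2.2.2 := by
  constructor
  · decide
  · constructor
    · decide
    · exact ⟨fun _ => by decide, fun _ _ => by decide⟩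

theorem pyRange_pos_nil (a b s : Int) (hs : 0 < s) (h : b ≤ a) :
    PySem.List.pyRange a b s = [] := by
  rw [PySem.List.pyRange_of_pos a b hs]
  simp [if_neg (by omega : ¬ a < b)]

theorem pyRange_pos_cons (a b s : Int) (hs : 0 < s) (h : a < b) :
    PySem.List.pyRange a b s = a :: PySem.List.pyRange (a + s) b s := by
  rw [PySem.List.pyRange_of_pos a b hs, PySem.List.pyRange_of_pos (a+s) b hs]
  have hdiv : (b - a + s - 1) / s = (b - a - 1) / s + 1 := by
    rw [show b - a + s - 1 = b - a - 1 + 1 * s by ring,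
      Int.add_mul_ediv_right (b - a - 1) 1 (by omega : s ≠ 0)]
  have hnn : 0 ≤ (b - a - 1) / s := Int.ediv_nonneg (by omega) (by omega)
  rw [if_pos h, hdiv]
  have h1 : ((b - a - 1) / s + 1).toNat = ((b - a - 1) / s).toNat + 1 := by omega
  rw [h1, List.range_succ_eq_map, List.map_cons, List.map_map]
  congr 1
  · omega
  by_cases h2 : a + s < b
  · rw [if_pos h2]
    have : (b - (a + s) + s - 1) / s = (b - a - 1) / s := by ring_nf
    rw [this]
    apply List.map_congr_left
    intro k _
    simp [Function.comp]; push_cast; ring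
  · rw [if_neg h2]
    have hlt : b - a - 1 < s := by omega
    have : (b - a - 1) / s = 0 := Int.ediv_eq_zero_of_lt (by omega) hlt
    simp [this]

theorem take_eq_map_range {α : Type} (xs : List α) (w : Nat) (hw : w ≤ xs.length) (d : α) :
    xs.take w = (List.range w).map (fun k => xs.getD k d) := by
  apply List.ext_getElem
  · simp [hw]
  · intro k h1 h2
    have hk : k < w := by simpa using h2
    simp [List.getElem_take, List.getElem?_eq_getElem (by omega : k < xs.length)]

theorem pyGetD_take_drop {α : Type} (xs : List α) (i0 w k : Nat) (hk : k < w)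
    (h : i0 + w ≤ xs.length) (d : α) :
    PySem.List.pyGetD (List.take w (List.drop i0 xs)) ((k : Int)) d = xs[i0 + k]'(by omega) := by
  rw [PySem.List.pyGetD_natCast, List.getD_eq_getElem _ _ (by simp; omega)]
  simp [List.getElem_take, List.getElem_drop]

theorem pvInterleave_eq (ns vs : List String) :
    pvInterleave ns vs = (ns.zip vs).flatMap (fun p => [p.1, p.2]) := by
  unfold pvInterleave
  rw [PySem.List.foldl_append_eq_flatMap]
  simp

theorem gd_eq_flatten (m e an av : List (List String)) (window i : Int)
    (h0 : 0 ≤ i) (hw : 0 ≤ window) (hin : i + window < (m.length : Int))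
    (he : (m.length : Int) - 1 ≤ (e.length : Int))
    (han : (m.length : Int) - 1 ≤ (an.length : Int))
    (hav : (m.length : Int) - 1 ≤ (av.length : Int)) :
    pvGd (PySem.List.slice m (some i) (some (i+window)))
         (PySem.List.slice e (some i) (some (i+window)))
         (PySem.List.slice an (some i) (some (i+window)))
         (PySem.List.slice av (some i) (some (i+window))) window =
    (PySem.List.slice ((m.zip (e.zip (an.zip av))).map pvFeatRow) (some i) (some (i+window))).flatten := by
  set feat := (m.zip (e.zip (an.zip av))).map pvFeatRow with hfeat
  set i0 := i.toNat with hi0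
  set w := window.toNat with hww
  have hiw : (i + window).toNat = i0 + w := by omega
  have hlenm : i0 + w < m.length := by omega
  have hlene : i0 + w ≤ e.length := by omega
  have hlenan : i0 + w ≤ an.length := by omega
  have hlenav : i0 + w ≤ av.length := by omega
  have hfl : i0 + w ≤ feat.length := by
    simp [hfeat]; omega
  -- rewrite all slices to drop/take
  rw [PySem.List.slice_toNat _ h0 (by omega), PySem.List.slice_toNat _ h0 (by omega),
      PySem.List.slice_toNat _ h0 (by omega), PySem.List.slice_toNat _ h0 (by omega),
      PySem.List.slice_toNat _ h0 (by omega), hiw]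
  rw [show i0 + w - i0 = w by omega]
  -- RHS : take into map over range
  rw [take_eq_map_range (feat.drop i0) w (by simp; omega) []]
  -- LHS : pvGd as flatMap over range
  unfold pvGd
  rw [PySem.List.foldl_append_eq_flatMap]
  rw [PySem.List.pyRange_one]
  rw [show ((window - 0).toNat) = w by omega]
  rw [List.flatMap_def, List.map_map, List.nil_append]
  congr 1
  apply List.map_congr_left
  intro k hk
  have hkw : k < w := by simpa using hk
  simp only [Function.comp, zero_add]
  rw [pyGetD_take_drop m i0 w k hkw (by omega) [], pyGetD_take_drop e i0 w k hkw hlene [],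
      pyGetD_take_drop an i0 w k hkw hlenan [], pyGetD_take_drop av i0 w k hkw hlenav [],
      pvInterleave_eq,
      List.getD_eq_getElem _ _ (by simp only [List.length_drop]; omega)]
  simp [hfeat, List.getElem_drop, List.getElem_zip, pvFeatRow]

theorem loop_eq (m e an av : List (List String)) (lable window step : Int)
    (hw : 0 ≤ window) (hs : 1 ≤ step)
    (hlen : 1 ≤ window → window < (m.length : Int) →
      ((m.length : Int) - 1 ≤ (e.length : Int) ∧ (m.length : Int) - 1 ≤ (an.length : Int) ∧
       (m.length : Int) - 1 ≤ (av.length : Int))) :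
    ∀ (fuel : Nat) (i : Int)
      (acc : List (List String) × List Int × List (List String) × List (List String) × List (List String)),
      0 ≤ i → (m.length : Int) - window - i ≤ (fuel : Int) →
      pvALoop m e an av lable window step fuel i acc.1 acc.2.1 acc.2.2.1 acc.2.2.2.1 acc.2.2.2.2 =
        (PySem.List.pyRange i ((m.length : Int) - window) step).foldl
          (pvBStep e an av ((m.zip (e.zip (an.zip av))).map pvFeatRow) lable window) acc := by
  intro fuel
  induction fuel with
  | zero =>
    intro i acc h0 hf
    rw [pyRange_pos_nil _ _ _ (by omega) (by simpa using hf)]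
    rfl
  | succ fuel ih =>
    intro i acc h0 hf
    by_cases hc : i + window < (m.length : Int)
    · have hgd : pvGd (PySem.List.slice m (some i) (some (i+window)))
          (PySem.List.slice e (some i) (some (i+window)))
          (PySem.List.slice an (some i) (some (i+window)))
          (PySem.List.slice av (some i) (some (i+window))) window =
          (PySem.List.slice ((m.zip (e.zip (an.zip av))).map pvFeatRow) (some i) (some (i+window))).flatten := by
        by_cases hw1 : 1 ≤ window
        · obtain ⟨he, han, hav⟩ := hlen hw1 (by omega)
          exact gd_eq_flatten m e an av window i h0 hw hc he han hav
        · have hw0 : window = 0 := by omega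
          subst hw0
          have hsf : PySem.List.slice ((m.zip (e.zip (an.zip av))).map pvFeatRow)
              (some i) (some (i+0)) = [] := by
            rw [show i + (0:Int) = i from add_zero i, PySem.List.slice_toNat _ h0 h0]
            simp
          rw [hsf]
          simp [pvGd, PySem.List.pyRange_one_eq_nil le_rfl]
      have hstep := ih (i + step) (pvBStep e an av ((m.zip (e.zip (an.zip av))).map pvFeatRow) lable window acc i)
        (by omega) (by push_cast at hf ⊢; omega)
      rw [pyRange_pos_cons i _ step (by omega) (by omega), List.foldl_cons, ← hstep]
      simp only [pvALoop, if_pos hc]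
      simp [pvBStep, hgd]
    · rw [pyRange_pos_nil _ _ _ (by omega) (by omega)]
      simp only [pvALoop, if_neg hc, List.foldl_nil]

-- ===== VERDICT (by name: the statement is the Claim_ definition above) =====
theorem groupBySqu_spec : Claim_equal_groupBySqu := by
  intro m e an av lable window step _dom hpre
  obtain ⟨hw, hstep, hlen⟩ := hpre
  unfold Spec_groupBySqu groupBySqu groupBySqu_alt
  by_cases hlt : window < (m.length : Int)
  · have hsp : 0 < step := by have := hstep hlt; omega
    simp only [if_pos hsp]
    have := loop_eq m e an av lable window step hw (hstep hlt) hlen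
      (m.length + 1) 0 ([], [], [], [], []) le_rfl (by push_cast; omega)
    simpa using this
  · have hA : pvALoop m e an av lable window step (m.length + 1) 0 [] [] [] [] [] =
        ([], [], [], [], []) := by
      simp only [pvALoop]
      rw [if_neg (by omega : ¬ ((0:Int) + window < (m.length : Int)))]
    rw [hA]
    by_cases hsp : 0 < step
    · simp [if_pos hsp, pyRange_pos_nil 0 ((m.length : Int) - window) step hsp (by omega)]
    · simp [if_neg hsp]
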